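-- pv_equiv track=rewrite | github.com/gaurav-S8/Supervised-CCT-ECG-Segmentation | data.py | isAllAnnotationValids
-- ===== SOURCE A (Python) =====
-- def isValidAnnotationFormat(annSymbols):
--     """
--     Checks if annotation symbols follow the expected format: (wave)
--     wave ∈ {'p', 'N', 't'}
--     """
--     waves = {'p', 'N', 't'}
--     if len(annSymbols) % 3 != 0:
--         return False
--
--     for i in range(0, len(annSymbols), 3):
--         if annSymbols[i] != '(' or annSymbols[i+1] not in waves or annSymbols[i+2] != ')':
--             return False
--     return True
--
-- def isAllAnnotationValids(annChannelDictionary):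
--     """
--     Validates annotation formats for all channels in an ECG record.
--
--     Each channel's annotation sequence is checked against the expected
--     triplet pattern: (wave), where 'wave' ∈ {'p', 'N', 't'}.
--
--     Parameters
--     ----------
--     annChannelDictionary : dict
--         Dictionary mapping channel names to their annotation symbol sequences.
--
--     Returns
--     -------
--     str or None
--         If invalid annotations are found, returns a message listing the
--         affected channels. Returns None if all annotations are valid.
--     """
--     annLengths = []
--     invalidChannels = []
--     for channel in annChannelDictionary.keys():
--         annLengths.append(len(annChannelDictionary[channel]))
--         isValid = isValidAnnotationFormat(annChannelDictionary[channel])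
--         if not isValid:
--             invalidChannels.append(channel)
--
--     if invalidChannels:
--         return f"Triplet issue in annotation(s) in channel(s): {'-'.join(invalidChannels)}"
--     return None
-- ===== SOURCE B (Python) =====
-- _EXPECT = ({'('}, {'p', 'N', 't'}, {')'})
--
-- def _accepts(symbols):
--     """3-state DFA cycling through 'expect (', 'expect wave', 'expect )';
--     accept iff every symbol matches and the scan ends back at state 0."""
--     state = 0
--     for sym in symbols:
--         if sym not in _EXPECT[state]:
--             return False
--         state = (state + 1) % 3
--     return state == 0
--
-- def isAllAnnotationValids(annChannelDictionary):
--     bad = [channel for channel, symbols in annChannelDictionary.items()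
--            if not _accepts(symbols)]
--     if bad:
--         return f"Triplet issue in annotation(s) in channel(s): {'-'.join(bad)}"
--     return None
-- ===== Notes on version B (the rewrite author's own statement) =====
-- stated objective: alternative
-- what changed: Replaces the length-mod-3 precheck plus stride-3 triple-indexing loop with a single left-to-right scan by a 3-state finite automaton (expect '(', expect wave, expect ')'), where acceptance in state 0 subsumes the divisibility check; the unused annLengths accumulator is dropped.
import Mathlib
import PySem

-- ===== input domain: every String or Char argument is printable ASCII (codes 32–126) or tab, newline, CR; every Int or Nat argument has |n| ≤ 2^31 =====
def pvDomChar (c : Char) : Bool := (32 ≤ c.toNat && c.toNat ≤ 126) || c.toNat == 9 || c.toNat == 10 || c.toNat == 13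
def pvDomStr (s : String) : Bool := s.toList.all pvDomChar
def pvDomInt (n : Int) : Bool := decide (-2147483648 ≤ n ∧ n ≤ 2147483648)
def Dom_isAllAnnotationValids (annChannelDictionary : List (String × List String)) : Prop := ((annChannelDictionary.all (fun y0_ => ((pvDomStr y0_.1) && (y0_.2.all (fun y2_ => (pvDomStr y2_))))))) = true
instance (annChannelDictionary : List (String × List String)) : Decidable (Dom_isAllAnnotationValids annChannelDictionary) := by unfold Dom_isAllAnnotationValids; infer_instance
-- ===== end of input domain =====

-- B replaces A's mod-3 precheck + stride-3 indexing loop by a single scan with a 3-state automaton (alternative, same cost); return-value equivalence only.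

-- ===== PORT A =====
-- the `for i in range(0, len(annSymbols), 3)` loop with early return; only entered when len % 3 == 0,
-- so the i+1 / i+2 indexings never leave the list (the `none` match arm is Python's unreachable IndexError)
def pvFmtLoop (waves : List String) (annSymbols : List String) (i : Nat) : Bool :=
  if _h : i < annSymbols.length then
    match PySem.List.pyGet? annSymbols (i : Int), PySem.List.pyGet? annSymbols ((i : Int) + 1),
          PySem.List.pyGet? annSymbols ((i : Int) + 2) with
    | some a, some b, some c =>
        if a ≠ "(" || !(waves.contains b) || c ≠ ")" then false
        else pvFmtLoop waves annSymbols (i + 3)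
    | _, _, _ => false
  else true
termination_by annSymbols.length - i

def pvIsValidAnnotationFormat (annSymbols : List String) : Bool :=
  let waves := PySem.Set.ofList ["p", "N", "t"]
  if PySem.Int.mod (PySem.List.len annSymbols) 3 ≠ 0 then false
  else pvFmtLoop waves annSymbols 0

def isAllAnnotationValids (annChannelDictionary : List (String × List String)) : Option String :=
  let dd := PySem.Dict.ofList annChannelDictionary
  let st := dd.keys.foldl (fun (st : List Int × List String) channel =>
      let annLengths := st.1 ++ [PySem.List.len (dd.getD channel [])]
      let isValid := pvIsValidAnnotationFormat (dd.getD channel [])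
      (annLengths, if !isValid then st.2 ++ [channel] else st.2)) ([], [])
  if st.2 ≠ [] then
    some ("Triplet issue in annotation(s) in channel(s): " ++ PySem.Str.join "-" st.2)
  else none

-- ===== PORT B =====
-- _EXPECT = ({'('}, {'p','N','t'}, {')'}) indexed by the automaton state
def pvExpect : Nat → List String
  | 0 => PySem.Set.ofList ["("]
  | 1 => PySem.Set.ofList ["p", "N", "t"]
  | _ => PySem.Set.ofList [")"]

-- the `for sym in symbols` scan with early `return False`; accept iff it ends at state 0
def pvAccepts (state : Nat) : List String → Bool
  | [] => state == 0
  | sym :: rest =>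
      if !(pvExpect state).contains sym then false
      else pvAccepts ((state + 1) % 3) rest

def isAllAnnotationValids_alt (annChannelDictionary : List (String × List String)) : Option String :=
  let dd := PySem.Dict.ofList annChannelDictionary
  let bad := (dd.items.filter (fun kv => !pvAccepts 0 kv.2)).map Prod.fst
  if bad ≠ [] then
    some ("Triplet issue in annotation(s) in channel(s): " ++ PySem.Str.join "-" bad)
  else none

-- ===== PRECONDITION & SPEC =====
def Spec_isAllAnnotationValids (annChannelDictionary : List (String × List String)) (out : Option String) : Prop := out = isAllAnnotationValids_alt annChannelDictionary
instance (annChannelDictionary : List (String × List String)) (out : Option String) : Decidable (Spec_isAllAnnotationValids annChannelDictionary out) := by unfold Spec_isAllAnnotationValids; infer_instance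

-- ===== CLAIM (what is proved, stated in full; the proofs are below) =====
def Claim_equal_isAllAnnotationValids : Prop := ∀ (annChannelDictionary : List (String × List String)), Dom_isAllAnnotationValids annChannelDictionary → Spec_isAllAnnotationValids annChannelDictionary (isAllAnnotationValids annChannelDictionary)

-- ===== LEMMAS AND PROOFS =====

theorem pvDrop3 {α : Type} (l : List α) (h : 3 ≤ l.length) :
    ∃ x y z r, l = x :: y :: z :: r := by
  rcases l with _ | ⟨x, _ | ⟨y, _ | ⟨z, r⟩⟩⟩ <;> simp at h ⊢

theorem pvGetCast0 (syms : List String) (a : Nat) :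
    PySem.List.pyGet? syms (a : Int) = (syms.drop a)[0]? := by
  rw [PySem.List.pyGet?_natCast, List.getElem?_drop]; simp

theorem pvGetCast1 (syms : List String) (a : Nat) :
    PySem.List.pyGet? syms ((a : Int) + 1) = (syms.drop a)[1]? := by
  have h : ((a : Int) + 1) = ((a + 1 : Nat) : Int) := by push_cast; ring
  rw [h, PySem.List.pyGet?_natCast, List.getElem?_drop]

theorem pvGetCast2 (syms : List String) (a : Nat) :
    PySem.List.pyGet? syms ((a : Int) + 2) = (syms.drop a)[2]? := by
  have h : ((a : Int) + 2) = ((a + 2 : Nat) : Int) := by push_cast; ring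
  rw [h, PySem.List.pyGet?_natCast, List.getElem?_drop]

theorem pvWavesLit : PySem.Set.ofList ["p", "N", "t"] = ["p", "N", "t"] := by decide

-- if the automaton accepts from state st, the remaining length completes the cycle mod 3
theorem pvAccepts_mod (l : List String) :
    ∀ st, st < 3 → pvAccepts st l = true → (st + l.length) % 3 = 0 := by
  induction l with
  | nil => intro st _ h; simp [pvAccepts] at h; simp [h]
  | cons x r ih =>
    intro st hst h
    simp only [pvAccepts] at h
    split at h
    · exact absurd h (by simp)
    · have := ih ((st + 1) % 3) (Nat.mod_lt _ (by norm_num)) h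
      simp only [List.length_cons]
      omega

-- one full cycle of the automaton from state 0 reads one '(w)' triple
theorem pvAccepts3 (a b c : String) (r : List String) :
    pvAccepts 0 (a :: b :: c :: r) =
      ((a == "(" && (b == "p" || b == "N" || b == "t") && c == ")") && pvAccepts 0 r) := by
  have h0 : pvExpect 0 = ["("] := by decide
  have h1 : pvExpect 1 = ["p", "N", "t"] := by decide
  have h2 : pvExpect 2 = [")"] := by decide
  simp only [pvAccepts, h0, h1, h2]
  by_cases ha : a = "(" <;> by_cases hb : b = "p" ∨ b = "N" ∨ b = "t" <;>
    by_cases hc : c = ")" <;> simp_all <;> tauto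

theorem pvFmtLoop_eq_accepts (syms : List String) :
    ∀ i, i ≤ syms.length → (syms.length - i) % 3 = 0 →
      pvFmtLoop (PySem.Set.ofList ["p", "N", "t"]) syms i = pvAccepts 0 (syms.drop i) := by
  intro i
  fun_induction pvFmtLoop (PySem.Set.ofList ["p", "N", "t"]) syms i with
  | case1 a ha x y z hgx hgy hgz hbad =>
    intro h1 h2
    obtain ⟨x', y', z', r, hd⟩ := pvDrop3 (syms.drop a) (by simp; omega)
    rw [pvGetCast2, hd] at hgx; rw [pvGetCast1, hd] at hgy; rw [pvGetCast0, hd] at hgz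
    simp at hgx hgy hgz
    subst hgx; subst hgy; subst hgz
    rw [hd, pvAccepts3]; symm
    rw [pvWavesLit] at hbad
    simp at hbad ⊢
    tauto
  | case2 a ha x y z hgx hgy hgz hgood ih =>
    intro h1 h2
    obtain ⟨x', y', z', r, hd⟩ := pvDrop3 (syms.drop a) (by simp; omega)
    rw [pvGetCast2, hd] at hgx; rw [pvGetCast1, hd] at hgy; rw [pvGetCast0, hd] at hgz
    simp at hgx hgy hgz
    subst hgx; subst hgy; subst hgz
    have h3 : List.drop 3 (List.drop a syms) = List.drop (a + 3) syms := by
      rw [List.drop_drop]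
    rw [hd] at h3
    simp at h3
    rw [ih (by omega) (by omega), hd, pvAccepts3, ← h3]
    rw [pvWavesLit] at hgood
    simp at hgood
    simp [hgood]
    tauto
  | case3 a ha hnone =>
    intro h1 h2
    exfalso
    obtain ⟨x', y', z', r, hd⟩ := pvDrop3 (syms.drop a) (by simp; omega)
    exact hnone x' y' z' (by rw [pvGetCast0, hd]; rfl) (by rw [pvGetCast1, hd]; rfl)
      (by rw [pvGetCast2, hd]; rfl)
  | case4 a ha =>
    intro h1 h2
    have h0 : syms.drop a = [] := List.drop_eq_nil_of_le (by omega)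
    rw [h0]; rfl

theorem pvValid_eq (syms : List String) :
    (!pvIsValidAnnotationFormat syms) = (!pvAccepts 0 syms) := by
  by_cases hlen : syms.length % 3 = 0
  · have hm0 : PySem.Int.mod (PySem.List.len syms) 3 = 0 := by
      rw [PySem.List.len_eq, show ((3:Int)) = ((3:Nat) : Int) from by norm_num,
        PySem.Int.mod_natCast, hlen]
      rfl
    have hA := pvFmtLoop_eq_accepts syms 0 (Nat.zero_le _) (by simpa using hlen)
    simp at hA
    simp only [pvIsValidAnnotationFormat, hm0]
    simp [hA]
  · have hm0 : PySem.Int.mod (PySem.List.len syms) 3 ≠ 0 := by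
      rw [PySem.List.len_eq, show ((3:Int)) = ((3:Nat) : Int) from by norm_num,
        PySem.Int.mod_natCast]
      exact_mod_cast fun h => hlen (by exact_mod_cast h)
    simp only [pvIsValidAnnotationFormat, if_pos hm0]
    cases hacc : pvAccepts 0 syms
    · simp
    · exact absurd (pvAccepts_mod syms 0 (by norm_num) hacc) (by simpa using hlen)

theorem pvFold_snd (dd : PySem.Dict String (List String)) :
    ∀ (ks : List String) (acc : List Int × List String),
      (ks.foldl (fun (st : List Int × List String) channel =>
          (st.1 ++ [PySem.List.len (dd.getD channel [])],
           if !pvIsValidAnnotationFormat (dd.getD channel []) then st.2 ++ [channel] else st.2))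
        acc).2
      = acc.2 ++ ks.filter (fun k => !pvIsValidAnnotationFormat (dd.getD k [])) := by
  intro ks
  induction ks with
  | nil => intro acc; simp
  | cons k rest ih =>
    intro acc
    rw [List.foldl_cons, ih]
    by_cases hv : pvIsValidAnnotationFormat (dd.getD k []) = true <;>
      simp [hv]

theorem pvBad_eq_keysFilter (d : List (String × List String)) :
    ((PySem.Dict.ofList d).items.filter (fun kv => !pvAccepts 0 kv.2)).map Prod.fst
    = (PySem.Dict.ofList d).keys.filter
        (fun k => !pvIsValidAnnotationFormat ((PySem.Dict.ofList d).getD k [])) := by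
  have hnd : (PySem.Dict.ofList d).keys.Nodup := PySem.Dict.nodup_keys_ofList d
  rw [PySem.Dict.items_eq_map_keys _ hnd ([] : List String)]
  rw [List.filter_map, List.map_map]
  have hfun : ((fun kv : String × List String => !pvAccepts 0 kv.2) ∘
        (fun k => (k, (PySem.Dict.ofList d).getD k [])))
      = (fun k => !pvIsValidAnnotationFormat ((PySem.Dict.ofList d).getD k [])) := by
    funext k
    simp only [Function.comp]
    exact (pvValid_eq _).symm
  rw [hfun, show (Prod.fst ∘ (fun k => (k, (PySem.Dict.ofList d).getD k []))) = id from rfl,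
    List.map_id]

theorem pvMain (d : List (String × List String)) :
    isAllAnnotationValids d = isAllAnnotationValids_alt d := by
  simp only [isAllAnnotationValids, isAllAnnotationValids_alt]
  rw [pvFold_snd (PySem.Dict.ofList d), pvBad_eq_keysFilter]
  rfl

-- ===== VERDICT (by name: the statement is the Claim_ definition above) =====
theorem isAllAnnotationValids_spec : Claim_equal_isAllAnnotationValids := by
  intro d _
  unfold Spec_isAllAnnotationValids
  exact pvMain d
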